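-- pv_equiv track=rewrite | github.com/vishalshirke7/DSA | two_pointer/lexicographically-largest-array.py | solve
-- ===== SOURCE A (Python) =====
-- def solve(A):
-- 	index = 1
-- 	cur_ptr = len(A) - 1
-- 	last_seen = len(A) - 1
-- 	while index <= cur_ptr:
-- 		if A[cur_ptr] > A[cur_ptr - index]:
-- 			last_seen = cur_ptr - index
-- 		index += 1
-- 	if last_seen == cur_ptr:
-- 		return A
-- 	else:
-- 		start, end = last_seen, len(A) - 1
-- 		while start < end:
-- 			A[start], A[end] = A[end], A[start]
-- 			start += 1
-- 			end -= 1
-- 	return A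
-- ===== SOURCE B (Python) =====
-- def solve(A):
--     # One forward pass partitions A at the first element smaller than the last
--     # into a kept prefix `out` and a stack `suf`; draining the stack emits the
--     # suffix reversed.  No indices, no slicing, no two-pointer swapping.
--     out, suf, found = [], [], False
--     for x in A:
--         if found or x < A[-1]:
--             found = True
--             suf.append(x)
--         else:
--             out.append(x)
--     while suf:
--         out.append(suf.pop())
--     A[:] = out
--     return A
-- ===== Notes on version B (the rewrite author's own statement) =====
-- stated objective: alternative
-- what changed: Replaces A's index-based search (right-to-left accumulate loop) and in-place two-pointer swap by an index-free single forward pass that partitions the list at the first element smaller than the last into a kept prefix and a stack, then drains the stack to emit the suffix reversed.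
import Mathlib
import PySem

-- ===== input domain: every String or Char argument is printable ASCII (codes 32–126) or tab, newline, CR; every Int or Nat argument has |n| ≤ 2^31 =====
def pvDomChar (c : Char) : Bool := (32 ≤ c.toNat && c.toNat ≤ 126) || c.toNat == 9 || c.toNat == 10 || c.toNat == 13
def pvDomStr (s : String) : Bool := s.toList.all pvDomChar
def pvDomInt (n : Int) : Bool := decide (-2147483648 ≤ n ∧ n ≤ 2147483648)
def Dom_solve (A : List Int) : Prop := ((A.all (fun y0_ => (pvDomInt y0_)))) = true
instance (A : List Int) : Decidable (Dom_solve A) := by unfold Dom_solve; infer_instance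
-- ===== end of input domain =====

-- B replaces A's index-based backward search + two-pointer swap loop by an
-- index-free forward partition pass plus a stack drain (objective: alternative).
-- Both Pythons mutate the argument list in place to the same final state; the
-- theorems are about the returned value.

-- ===== PORT A =====
-- first while loop: indices cur and cur - index are always in range when the loop
-- body runs, so pyGetD (Python indexing, exact in range) is exact here
def solveLoop1 (A : List Int) (cur : Int) (index last : Int) : Int :=
  if index ≤ cur then
    solveLoop1 A cur (index + 1)
      (if PySem.List.pyGetD A cur 0 > PySem.List.pyGetD A (cur - index) 0 then cur - index else last)
  else last
termination_by (cur + 1 - index).toNat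
decreasing_by simp_wf; omega

-- second while loop: start and end are always in range, so pyGetD/pySetD are exact
def solveLoop2 (A : List Int) (start stop : Int) : List Int :=
  if start < stop then
    solveLoop2
      (PySem.List.pySetD (PySem.List.pySetD A start (PySem.List.pyGetD A stop 0))
        stop (PySem.List.pyGetD A start 0))
      (start + 1) (stop - 1)
  else A
termination_by (stop - start).toNat
decreasing_by simp_wf; omega

def solve (A : List Int) : List Int :=
  let cur_ptr : Int := (A.length : Int) - 1
  let last_seen := solveLoop1 A cur_ptr 1 ((A.length : Int) - 1)
  if last_seen = cur_ptr then A
  else solveLoop2 A last_seen ((A.length : Int) - 1)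

-- ===== PORT B =====
-- 'while suf: out.append(suf.pop())': pop() on a nonempty list removes and
-- returns the last element, exactly getLast?/dropLast here
def altDrain (out suf : List Int) : List Int :=
  if suf.isEmpty then out
  else altDrain (out ++ [suf.getLast?.getD 0]) suf.dropLast
termination_by suf.length
decreasing_by
  simp_wf
  cases suf with
  | nil => simp_all
  | cons a t => simp

-- the for loop over A; A[-1] is only read while iterating, i.e. A nonempty,
-- where it is A.getLast?.getD 0; state is (out, suf, found)
def solve_alt (A : List Int) : List Int :=
  let s := A.foldl
    (fun (st : List Int × List Int × Bool) x =>
      if st.2.2 || decide (x < A.getLast?.getD 0) then (st.1, st.2.1 ++ [x], true)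
      else (st.1 ++ [x], st.2.1, st.2.2))
    ([], [], false)
  altDrain s.1 s.2.1

-- ===== PRECONDITION & SPEC =====
def Spec_solve (A : List Int) (out : List Int) : Prop := out = solve_alt A
instance (A : List Int) (out : List Int) : Decidable (Spec_solve A out) := by unfold Spec_solve; infer_instance

-- ===== CLAIM (what is proved, stated in full; the proofs are below) =====
def Claim_equal_solve : Prop := ∀ (A : List Int), Dom_solve A → Spec_solve A (solve A)

-- ===== LEMMAS AND PROOFS =====

-- A's first loop finds the leftmost index whose element is smaller than the last
-- element, looking only at the prefix A[0 : len - index] still to be scanned.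
theorem loop1_spec (A : List Int) (index lastS : Int) (h1 : 1 ≤ index) :
    solveLoop1 A ((A.length : Int) - 1) index lastS =
      (match (A.take ((A.length : Int) - index).toNat).findIdx?
          (fun x => decide (x < A.getLast?.getD 0)) with
       | some j => (j : Int)
       | none => lastS) := by
  rw [solveLoop1]
  by_cases hc : index ≤ (A.length : Int) - 1
  · rw [if_pos hc]
    rw [loop1_spec A (index + 1) _ (by omega)]
    have hkl : ((A.length : Int) - (index + 1)).toNat < A.length := by omega
    set k : Nat := ((A.length : Int) - (index + 1)).toNat with hk
    clear_value k
    have hkk : (A.length : Int) - 1 - index = (k : Int) := by omega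
    have h2 : ((A.length : Int) - index).toNat = k + 1 := by omega
    rw [h2, List.take_add_one]
    have h3 : A[k]?.toList = [A[k]] := by rw [List.getElem?_eq_getElem hkl]; rfl
    rw [h3, List.findIdx?_append]
    have hcur : PySem.List.pyGetD A ((A.length : Int) - 1) 0 = A.getLast?.getD 0 := by
      rw [PySem.List.pyGetD_eq_getElem A 0 (by omega) (by omega), List.getLast?_eq_getElem?,
        List.getElem?_eq_getElem (by omega), Option.getD_some]
      congr 1
      omega
    have hk' : PySem.List.pyGetD A ((A.length : Int) - 1 - index) 0 = A[k] := by
      rw [PySem.List.pyGetD_eq_getElem A 0 (by omega) (by omega)]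
      congr 1
      omega
    rw [hcur, hk']
    cases hfi : (A.take k).findIdx? (fun x => decide (x < A.getLast?.getD 0)) with
    | some j => simp
    | none =>
      by_cases hlt : A[k] < A.getLast?.getD 0
      · rw [if_pos hlt]
        simp only [List.findIdx?_singleton, hlt, decide_true, if_true, Option.map_some,
          Option.none_or, List.length_take]
        rw [min_eq_left (le_of_lt hkl), Nat.zero_add]
        exact hkk
      · rw [if_neg hlt]
        simp [hlt]
  · rw [if_neg hc]
    have h0 : ((A.length : Int) - index).toNat = 0 := by omega
    rw [h0]
    simp
termination_by ((A.length : Int) - index).toNat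
decreasing_by simp_wf; omega

-- A's second loop reverses the segment [start, stop] of the list, elementwise.
theorem loop2_getElem? (A : List Int) (s e : Int) (hs : 0 ≤ s) (he : e < (A.length : Int))
    (hse : s ≤ e + 1) (kk : Nat) :
    (solveLoop2 A s e)[kk]? =
      if s ≤ (kk : Int) ∧ (kk : Int) ≤ e then A[(s + e - kk).toNat]? else A[kk]? := by
  rw [solveLoop2]
  by_cases hc : s < e
  · rw [if_pos hc]
    have hge : PySem.List.pyGetD A e 0 = A[e.toNat]'(by omega) :=
      PySem.List.pyGetD_eq_getElem A 0 (by omega) (by omega)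
    have hgs : PySem.List.pyGetD A s 0 = A[s.toNat]'(by omega) :=
      PySem.List.pyGetD_eq_getElem A 0 (by omega) (by omega)
    set l := PySem.List.pySetD (PySem.List.pySetD A s (PySem.List.pyGetD A e 0)) e
        (PySem.List.pyGetD A s 0) with hl
    have hldef : l = (A.set s.toNat (A[e.toNat]'(by omega))).set e.toNat (A[s.toNat]'(by omega)) := by
      rw [hl, PySem.List.pySetD_of_nonneg _ _ (by omega : (0:Int) ≤ e),
        PySem.List.pySetD_of_nonneg _ _ hs, hge, hgs]
    have hlen : l.length = A.length := by rw [hldef]; simp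
    have hlget : ∀ j : Nat, l[j]? =
        if (j : Int) = s then A[e.toNat]? else if (j : Int) = e then A[s.toNat]? else A[j]? := by
      intro j
      rw [hldef, List.getElem?_set, List.getElem?_set]
      simp only [List.length_set]
      split_ifs <;>
        first
          | rfl
          | omega
          | (rw [List.getElem?_eq_getElem (by omega)])
    rw [loop2_getElem? l (s + 1) (e - 1) (by omega) (by rw [hlen]; omega) (by omega) kk]
    by_cases h1 : s + 1 ≤ (kk : Int) ∧ (kk : Int) ≤ e - 1
    · rw [if_pos h1]
      have hm : ((s + 1 + (e - 1) - kk).toNat : Int) = s + e - kk := by omega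
      rw [hlget, if_neg (by omega), if_neg (by omega), if_pos (by omega)]
      congr 1
      omega
    · rw [if_neg h1, hlget]
      by_cases h2 : s ≤ (kk : Int) ∧ (kk : Int) ≤ e
      · rw [if_pos h2]
        rcases (by omega : (kk : Int) = s ∨ (kk : Int) = e) with hks | hke
        · rw [if_pos hks]
          congr 1
          omega
        · rw [if_neg (by omega), if_pos hke]
          congr 1
          omega
      · rw [if_neg h2, if_neg (by omega), if_neg (by omega)]
  · rw [if_neg hc]
    split_ifs with h
    · have : (s + e - kk).toNat = kk := by omega
      rw [this]
    · rfl
termination_by (e - s).toNat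
decreasing_by simp_wf; omega

-- B's take-i ++ reversed-drop-i value, elementwise, in the shape of loop2_getElem?.
theorem revSuffix_getElem? (A : List Int) (i : Nat) (kk : Nat) :
    (A.take i ++ (A.drop i).reverse)[kk]? =
      if (i : Int) ≤ (kk : Int) ∧ (kk : Int) ≤ (A.length : Int) - 1 then
        A[((i : Int) + ((A.length : Int) - 1) - kk).toNat]? else A[kk]? := by
  by_cases hi : i ≤ A.length
  swap
  · rw [List.take_of_length_le (by omega), List.drop_eq_nil_of_le (by omega)]
    simp only [List.reverse_nil, List.append_nil]
    rw [if_neg (by omega)]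
  rw [List.getElem?_append]
  simp only [List.length_take]
  by_cases h1 : kk < i
  · rw [if_pos (by omega), List.getElem?_take, if_pos h1, if_neg (by omega)]
  · rw [if_neg (by omega)]
    by_cases h2 : kk < A.length
    · rw [List.getElem?_reverse (by simp only [List.length_drop]; omega), List.getElem?_drop,
        if_pos (by omega)]
      congr 1
      simp only [List.length_drop]
      omega
    · rw [if_neg (by omega),
        List.getElem?_eq_none (by simp only [List.length_reverse, List.length_drop]; omega),
        List.getElem?_eq_none (by omega)]

-- the last element never satisfies x < last, so the scan over all of A equals
-- A's scan of the proper prefix A[0 : len-1]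
theorem findIdx?_drop_last (A : List Int) :
    A.findIdx? (fun x => decide (x < A.getLast?.getD 0)) =
      (A.take (A.length - 1)).findIdx? (fun x => decide (x < A.getLast?.getD 0)) := by
  rcases List.eq_nil_or_concat A with rfl | ⟨ys, y, rfl⟩
  · rfl
  · simp only [List.concat_eq_append]
    have hlast : (ys ++ [y]).getLast?.getD 0 = y := by simp
    have htake : (ys ++ [y]).take ((ys ++ [y]).length - 1) = ys := by
      rw [show (ys ++ [y]).length - 1 = ys.length by simp]
      exact List.take_left ..
    rw [hlast, htake, List.findIdx?_append]
    simp

-- draining the stack appends its reversal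
theorem altDrain_eq (out suf : List Int) : altDrain out suf = out ++ suf.reverse := by
  rw [altDrain]
  cases hs : suf.isEmpty
  · rw [if_neg (by simp_all)]
    rcases List.eq_nil_or_concat suf with rfl | ⟨ys, y, rfl⟩
    · simp at hs
    · simp only [List.concat_eq_append]
      rw [altDrain_eq]
      simp
  · rw [if_pos rfl]
    have := List.isEmpty_iff.mp hs
    simp [this]
termination_by suf.length
decreasing_by
  simp_wf
  rename_i hsy
  simp [hsy]

-- once found is true, the pass pushes everything onto the stack
theorem scan_true (p : Int → Bool) (xs out suf : List Int) :
    xs.foldl (fun (st : List Int × List Int × Bool) x =>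
        if st.2.2 || p x then (st.1, st.2.1 ++ [x], true)
        else (st.1 ++ [x], st.2.1, st.2.2)) (out, suf, true) = (out, suf ++ xs, true) := by
  induction xs generalizing suf with
  | nil => simp
  | cons a t ih =>
    simp only [List.foldl_cons, Bool.true_or, if_true]
    rw [ih]
    simp

-- from the initial state the pass partitions at the first element satisfying p
theorem scan_false (p : Int → Bool) (xs out : List Int) :
    xs.foldl (fun (st : List Int × List Int × Bool) x =>
        if st.2.2 || p x then (st.1, st.2.1 ++ [x], true)
        else (st.1 ++ [x], st.2.1, st.2.2)) (out, [], false) =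
      (out ++ xs.takeWhile (fun x => !p x), xs.dropWhile (fun x => !p x),
        !(xs.dropWhile (fun x => !p x)).isEmpty) := by
  induction xs generalizing out with
  | nil => simp
  | cons a t ih =>
    by_cases hp : p a
    · simp only [List.foldl_cons, Bool.false_or, hp, if_true]
      rw [scan_true]
      simp [hp]
    · simp only [List.foldl_cons, Bool.false_or]
      rw [if_neg hp, ih]
      simp [hp]

-- findIdx? vs takeWhile/dropWhile of the negation
theorem takeWhile_dropWhile_findIdx? (p : Int → Bool) (xs : List Int) :
    (match xs.findIdx? p with
     | none => xs.takeWhile (fun x => !p x) = xs ∧ xs.dropWhile (fun x => !p x) = []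
     | some i => xs.takeWhile (fun x => !p x) = xs.take i ∧
         xs.dropWhile (fun x => !p x) = xs.drop i) := by
  induction xs with
  | nil => simp
  | cons a t ih =>
    by_cases hp : p a
    · simp [List.findIdx?_cons, hp]
    · simp only [List.findIdx?_cons, hp]
      cases hfi : t.findIdx? p with
      | none =>
        rw [hfi] at ih
        simp_all
      | some i =>
        rw [hfi] at ih
        simp_all

-- B's value in the take/reverse-drop shape used by the elementwise lemmas
theorem solve_alt_eq (A : List Int) :
    solve_alt A =
      (match A.findIdx? (fun x => decide (x < A.getLast?.getD 0)) with
       | none => A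
       | some i => A.take i ++ (A.drop i).reverse) := by
  unfold solve_alt
  rw [scan_false, altDrain_eq]
  have h := takeWhile_dropWhile_findIdx? (fun x => decide (x < A.getLast?.getD 0)) A
  cases hfi : A.findIdx? (fun x => decide (x < A.getLast?.getD 0)) with
  | none =>
    rw [hfi] at h
    simp [h.1, h.2]
  | some i =>
    rw [hfi] at h
    simp [h.1, h.2]

-- ===== VERDICT (by name: the statement is the Claim_ definition above) =====
theorem solve_spec : Claim_equal_solve := by
  intro A _
  unfold Spec_solve solve
  rw [solve_alt_eq]
  simp only []
  rw [loop1_spec A 1 ((A.length : Int) - 1) le_rfl, findIdx?_drop_last A]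
  have hT : ((A.length : Int) - 1).toNat = A.length - 1 := by omega
  rw [hT]
  cases hfi : (A.take (A.length - 1)).findIdx? (fun x => decide (x < A.getLast?.getD 0)) with
  | none => simp
  | some i =>
    have hib : i < (A.take (A.length - 1)).length :=
      (List.findIdx?_eq_some_iff_findIdx_eq.mp hfi).1
    have hi : i < A.length - 1 := by simpa using hib
    have hA : 1 ≤ A.length := by omega
    simp only []
    rw [if_neg (by omega)]
    apply List.ext_getElem?
    intro kk
    rw [loop2_getElem? A (i : Int) ((A.length : Int) - 1) (by omega) (by omega) (by omega) kk,
      revSuffix_getElem? A i kk]
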